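-- pv_equiv track=rewrite | github.com/moha44ndy/project_douane | sam/app.py | infer_section_from_chapter
-- ===== SOURCE A (Python) =====
-- SECTION_RANGES = [
--     ("I", range(1, 6)),
--     ("II", range(6, 15)),
--     ("III", range(15, 16)),
--     ("IV", range(16, 25)),
--     ("V", range(25, 28)),
--     ("VI", range(28, 39)),
--     ("VII", range(39, 41)),
--     ("VIII", range(41, 44)),
--     ("IX", range(44, 47)),
--     ("X", range(47, 50)),
--     ("XI", range(50, 64)),
--     ("XII", range(64, 68)),
--     ("XIII", range(68, 71)),
--     ("XIV", range(71, 72)),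
--     ("XV", range(72, 84)),
--     ("XVI", range(84, 86)),
--     ("XVII", range(86, 90)),
--     ("XVIII", range(90, 93)),
--     ("XIX", range(93, 94)),
--     ("XX", range(94, 97)),
--     ("XXI", range(97, 98)),
-- ]
--
-- def infer_section_from_chapter(chapter_code: str | None) -> str | None:
--     if not chapter_code:
--         return None
--     try:
--         value = int(chapter_code)
--     except ValueError:
--         return None
--     for section_name, chapter_range in SECTION_RANGES:
--         if value in chapter_range:
--             return section_name
--     return None
-- ===== SOURCE B (Python) =====
-- # B: replace the linear scan over (section, range) pairs by a hand-written binary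
-- # search over the sorted section boundary array (largest boundary <= chapter).
-- BOUNDS = [1, 6, 15, 16, 25, 28, 39, 41, 44, 47, 50, 64, 68, 71, 72, 84, 86, 90, 93, 94, 97, 98]
-- NAMES = ["I", "II", "III", "IV", "V", "VI", "VII", "VIII", "IX", "X", "XI",
--          "XII", "XIII", "XIV", "XV", "XVI", "XVII", "XVIII", "XIX", "XX", "XXI"]
--
-- def infer_section_from_chapter(chapter_code):
--     if not chapter_code:
--         return None
--     try:
--         value = int(chapter_code)
--     except ValueError:
--         return None
--     if value < BOUNDS[0] or value >= BOUNDS[-1]: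
--         return None
--     # binary search for the largest index lo with BOUNDS[lo] <= value
--     lo, hi = 0, len(BOUNDS) - 1
--     while hi - lo > 1:
--         mid = (lo + hi) // 2
--         if BOUNDS[mid] <= value:
--             lo = mid
--         else:
--             hi = mid
--     return NAMES[lo]
-- ===== Notes on version B (the rewrite author's own statement) =====
-- stated objective: alternative
-- what changed: The per-call linear scan over (section, range) pairs is replaced by a hand-written binary search over a sorted array of section boundary chapters (find the largest boundary <= chapter), with one range guard.
import Mathlib
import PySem

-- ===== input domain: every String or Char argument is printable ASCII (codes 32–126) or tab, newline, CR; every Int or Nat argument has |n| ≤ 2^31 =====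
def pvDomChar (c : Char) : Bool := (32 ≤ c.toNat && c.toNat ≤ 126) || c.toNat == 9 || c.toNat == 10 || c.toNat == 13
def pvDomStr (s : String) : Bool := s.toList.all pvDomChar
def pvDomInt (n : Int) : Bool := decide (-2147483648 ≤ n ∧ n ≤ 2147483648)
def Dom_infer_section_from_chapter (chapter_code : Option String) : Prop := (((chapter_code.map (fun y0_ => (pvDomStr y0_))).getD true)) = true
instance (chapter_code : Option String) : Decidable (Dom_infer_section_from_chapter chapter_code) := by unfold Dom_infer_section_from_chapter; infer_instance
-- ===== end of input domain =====

-- B replaces A's linear scan over (section, range) pairs by a binary search over the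
-- sorted array of section boundary chapters (alternative algorithm, same results).


-- ===== PORT A =====
-- range(a, b) (step 1) is ported as the bounds pair (a, b); 'value in range(a, b)' is a ≤ value < b (exact for step 1).
def SECTION_RANGES : List (String × Int × Int) :=
  [("I", 1, 6), ("II", 6, 15), ("III", 15, 16), ("IV", 16, 25), ("V", 25, 28),
   ("VI", 28, 39), ("VII", 39, 41), ("VIII", 41, 44), ("IX", 44, 47), ("X", 47, 50),
   ("XI", 50, 64), ("XII", 64, 68), ("XIII", 68, 71), ("XIV", 71, 72), ("XV", 72, 84),
   ("XVI", 84, 86), ("XVII", 86, 90), ("XVIII", 90, 93), ("XIX", 93, 94), ("XX", 94, 97),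
   ("XXI", 97, 98)]

-- the 'for section_name, chapter_range in SECTION_RANGES' loop with its early return
def inferLoop (value : Int) : List (String × Int × Int) → Option String
  | [] => none
  | (section_name, lo, hi) :: rest =>
      if lo ≤ value ∧ value < hi then some section_name else inferLoop value rest

def infer_section_from_chapter (chapter_code : Option String) : Option String :=
  match chapter_code with
  | none => none                       -- 'if not chapter_code'
  | some s =>
    if s = "" then none                -- falsy empty string
    else
      match PySem.Int.ofStr? s with    -- int(s); none = ValueError
      | none => none
      | some value => inferLoop value SECTION_RANGES

-- ===== PORT B =====
def BOUNDS : List Int :=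
  [1, 6, 15, 16, 25, 28, 39, 41, 44, 47, 50, 64, 68, 71, 72, 84, 86, 90, 93, 94, 97, 98]
def NAMES : List String :=
  ["I", "II", "III", "IV", "V", "VI", "VII", "VIII", "IX", "X", "XI",
   "XII", "XIII", "XIV", "XV", "XVI", "XVII", "XVIII", "XIX", "XX", "XXI"]

-- the 'while hi - lo > 1' binary-search loop, made total with a fuel argument
-- (fuel ≥ hi - lo suffices; BOUNDS indices reached are always in range, so getD is exact)
def bsearchLoop (value : Int) : Nat → Nat → Nat → Nat
  | 0, lo, _ => lo
  | fuel + 1, lo, hi =>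
      if hi - lo > 1 then
        let mid := (lo + hi) / 2
        if BOUNDS.getD mid 0 ≤ value then bsearchLoop value fuel mid hi
        else bsearchLoop value fuel lo mid
      else lo

def infer_section_from_chapter_alt (chapter_code : Option String) : Option String :=
  match chapter_code with
  | none => none
  | some s =>
    if s = "" then none
    else
      match PySem.Int.ofStr? s with
      | none => none
      | some value =>
        -- BOUNDS[0] and BOUNDS[-1]: constant in-range indices, getD is exact
        if value < BOUNDS.getD 0 0 ∨ BOUNDS.getD (BOUNDS.length - 1) 0 ≤ value then none
        else
          -- NAMES[lo]: lo always lands in range, pyGet? returns the element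
          PySem.List.pyGet? NAMES ((bsearchLoop value BOUNDS.length 0 (BOUNDS.length - 1) : Nat) : Int)

-- ===== PRECONDITION & SPEC =====
def Spec_infer_section_from_chapter (chapter_code : Option String) (out : Option String) : Prop := out = infer_section_from_chapter_alt chapter_code
instance (chapter_code : Option String) (out : Option String) : Decidable (Spec_infer_section_from_chapter chapter_code out) := by unfold Spec_infer_section_from_chapter; infer_instance

-- ===== CLAIM (what is proved, stated in full; the proofs are below) =====
def Claim_equal_infer_section_from_chapter : Prop := ∀ (chapter_code : Option String), Dom_infer_section_from_chapter chapter_code → Spec_infer_section_from_chapter chapter_code (infer_section_from_chapter chapter_code)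

-- ===== LEMMAS AND PROOFS =====

lemma inferLoop_eq_none (v : Int) (L : List (String × Int × Int))
    (h : ∀ p ∈ L, ¬(p.2.1 ≤ v ∧ v < p.2.2)) : inferLoop v L = none := by
  induction L with
  | nil => rfl
  | cons p rest ih =>
    obtain ⟨name, lo, hi⟩ := p
    rw [inferLoop, if_neg (h (name, lo, hi) (List.mem_cons_self))]
    exact ih (fun q hq => h q (List.mem_cons_of_mem _ hq))

set_option maxRecDepth 8192 in
set_option maxHeartbeats 2000000 in
lemma core (value : Int) :
    inferLoop value SECTION_RANGES =
      (if value < BOUNDS.getD 0 0 ∨ BOUNDS.getD (BOUNDS.length - 1) 0 ≤ value then none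
       else PySem.List.pyGet? NAMES
         ((bsearchLoop value BOUNDS.length 0 (BOUNDS.length - 1) : Nat) : Int)) := by
  by_cases h : 1 ≤ value ∧ value ≤ 97
  · obtain ⟨h1, h2⟩ := h
    interval_cases value <;> decide
  · have hb : BOUNDS.getD 0 0 = 1 ∧ BOUNDS.getD (BOUNDS.length - 1) 0 = (98 : Int) := by decide
    rw [if_pos (by omega)]
    apply inferLoop_eq_none
    intro p hp
    fin_cases hp <;> dsimp only <;> omega

-- ===== VERDICT (by name: the statement is the Claim_ definition above) =====
theorem infer_section_from_chapter_spec : Claim_equal_infer_section_from_chapter := by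
  intro chapter_code _
  unfold Spec_infer_section_from_chapter infer_section_from_chapter infer_section_from_chapter_alt
  cases chapter_code with
  | none => rfl
  | some s =>
    by_cases hs : s = ""
    · simp [hs]
    · simp only [hs, if_false]
      cases PySem.Int.ofStr? s with
      | none => rfl
      | some value => exact core value
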